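-- pv_equiv track=rewrite | github.com/Jacob-Barhak/FairTournament | Fair.py | NumberOfPlayersAndJudges
-- ===== SOURCE A (Python) =====
-- def NumberOfPlayersAndJudges(TeamSizes):
--     "Calculate number of players and find judges"
--     NumberOfPlayers = 0
--     Judges = []
--     for TeamSize in TeamSizes:
--         # a negative team size means a judge at the begining of the team
--         if TeamSize<0:
--             Judges.append(abs(NumberOfPlayers))
--         NumberOfPlayers = NumberOfPlayers + abs(TeamSize)
--     return NumberOfPlayers,Judges
-- ===== SOURCE B (Python) =====
-- from itertools import accumulate
--
-- def NumberOfPlayersAndJudges(TeamSizes):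
--     "Calculate number of players and find judges"
--     P = list(accumulate(map(abs, TeamSizes), initial=0))
--     Judges = [P[i] for i, t in enumerate(TeamSizes) if t < 0]
--     return P[-1], Judges
-- ===== Notes on version B (the rewrite author's own statement) =====
-- stated objective: alternative
-- what changed: Replaces the fused running-accumulator loop with an exclusive prefix-sum table built by itertools.accumulate, then a comprehension reads judge positions from the table and the total is the table's last entry.
import Mathlib
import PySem

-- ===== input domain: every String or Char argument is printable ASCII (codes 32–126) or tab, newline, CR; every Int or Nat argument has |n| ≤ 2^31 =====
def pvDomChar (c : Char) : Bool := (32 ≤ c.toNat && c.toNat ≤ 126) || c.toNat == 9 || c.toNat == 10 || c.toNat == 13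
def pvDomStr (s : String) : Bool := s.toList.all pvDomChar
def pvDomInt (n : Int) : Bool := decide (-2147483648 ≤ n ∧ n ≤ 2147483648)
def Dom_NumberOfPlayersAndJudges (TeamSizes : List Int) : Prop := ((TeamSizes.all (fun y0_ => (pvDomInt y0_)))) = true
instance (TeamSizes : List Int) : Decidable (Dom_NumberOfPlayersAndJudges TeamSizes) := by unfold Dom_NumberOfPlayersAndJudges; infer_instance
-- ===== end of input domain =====

-- ===== PORT A =====
-- A: one fused loop keeping the running player count and the judge list.
def NumberOfPlayersAndJudges (TeamSizes : List Int) : Int × List Int :=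
  TeamSizes.foldl
    (fun (st : Int × List Int) (TeamSize : Int) =>
      (st.1 + |TeamSize|, if TeamSize < 0 then st.2 ++ [|st.1|] else st.2))
    (0, [])

-- ===== PORT B =====
-- B: exclusive prefix-sum table (itertools.accumulate with initial=0), then
-- the total is the last entry and judges are read off the table by a filter/map.
def NumberOfPlayersAndJudges_alt (TeamSizes : List Int) : Int × List Int :=
  let P := List.scanl (fun acc t => acc + |t|) 0 TeamSizes
  (P.getLastD 0,
   ((P.zip TeamSizes).filter (fun p => p.2 < 0)).map Prod.fst)
-- ===== PRECONDITION & SPEC =====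
def Spec_NumberOfPlayersAndJudges (TeamSizes : List Int) (out : Int × List Int) : Prop := out = NumberOfPlayersAndJudges_alt TeamSizes
instance (TeamSizes : List Int) (out : Int × List Int) : Decidable (Spec_NumberOfPlayersAndJudges TeamSizes out) := by unfold Spec_NumberOfPlayersAndJudges; infer_instance

-- ===== CLAIM (what is proved, stated in full; the proofs are below) =====
def Claim_equal_NumberOfPlayersAndJudges : Prop := ∀ (TeamSizes : List Int), Dom_NumberOfPlayersAndJudges TeamSizes → Spec_NumberOfPlayersAndJudges TeamSizes (NumberOfPlayersAndJudges TeamSizes)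

-- ===== LEMMAS AND PROOFS =====
lemma getLast?_getD_cons_scanl (ts : List Int) : ∀ (a b : Int),
    ((a :: List.scanl (fun acc t => acc + |t|) b ts).getLast?.getD 0)
      = b + (ts.map (fun t => |t|)).sum := by
  induction ts with
  | nil => intro a b; simp
  | cons u us ih =>
      intro a b
      simp only [List.scanl_cons, List.map, List.sum_cons, List.getLast?_cons_cons]
      rw [ih b (b + |u|)]; ring

lemma getLast?_getD_scanl (ts : List Int) (b : Int) :
    (List.scanl (fun acc t => acc + |t|) b ts).getLast?.getD 0
      = b + (ts.map (fun t => |t|)).sum := by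
  cases ts with
  | nil => simp
  | cons u us =>
      simp only [List.scanl_cons, List.map, List.sum_cons]
      rw [getLast?_getD_cons_scanl us b (b + |u|)]; ring

lemma fold_eq_scanl (ts : List Int) : ∀ (a : Int) (js : List Int), 0 ≤ a →
    ts.foldl
      (fun (st : Int × List Int) (TeamSize : Int) =>
        (st.1 + |TeamSize|, if TeamSize < 0 then st.2 ++ [|st.1|] else st.2))
      (a, js)
    = ((List.scanl (fun acc t => acc + |t|) a ts).getLastD 0,
       js ++ (((List.scanl (fun acc t => acc + |t|) a ts).zip ts).filter
                (fun p => p.2 < 0)).map Prod.fst) := by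
  induction ts with
  | nil => intro a js _; simp
  | cons t ts ih =>
      intro a js ha
      simp only [List.foldl_cons, List.scanl_cons, List.zip_cons_cons, List.filter_cons]
      rw [ih (a + |t|) _ (by positivity)]
      by_cases h : t < 0 <;> simp [h, abs_of_nonneg ha, getLast?_getD_cons_scanl, getLast?_getD_scanl] <;> ring

theorem pv_main : ∀ (TeamSizes : List Int),
    NumberOfPlayersAndJudges TeamSizes = NumberOfPlayersAndJudges_alt TeamSizes := by
  intro ts
  unfold NumberOfPlayersAndJudges NumberOfPlayersAndJudges_alt
  rw [fold_eq_scanl ts 0 [] le_rfl]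
  simp

-- ===== VERDICT (by name: the statement is the Claim_ definition above) =====
theorem NumberOfPlayersAndJudges_spec : Claim_equal_NumberOfPlayersAndJudges := by
  intro ts _
  unfold Spec_NumberOfPlayersAndJudges
  exact pv_main ts
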